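-- pv_equiv track=rewrite | github.com/Gentalion/studyOfPython | hw5/MultTable.py | makeColumnWithLength
-- ===== SOURCE A (Python) =====
-- def makeColumnWithLength (a,n):
-- 	pre = []
--
-- 	firstArgLen = len(str(a))
-- 	secondArgMaxLen = 0
-- 	thirdArgMaxLen = 0
-- 	for i in range(1,n+1):
-- 		cur = (str(a), str(i), str(a * i))
-- 		pre.append(cur)
-- 		secondArgMaxLen = max(secondArgMaxLen, len(cur[1]))
-- 		thirdArgMaxLen = max(thirdArgMaxLen, len(cur[2]))
--
-- 	return (pre, firstArgLen, secondArgMaxLen, thirdArgMaxLen)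
-- ===== SOURCE B (Python) =====
-- def makeColumnWithLength(a, n):
--     sa = str(a)
--     if n < 1:
--         return ([], len(sa), 0, 0)
--     pre = [(sa, str(i), str(a * i)) for i in range(1, n + 1)]
--     # Closed-form widths: decimal width is monotone in the value for the second
--     # column (i = 1..n) and in |a*i| for the third, so the maxima are attained at i = n.
--     return (pre, len(sa), len(str(n)), len(str(a * n)))
-- ===== Notes on version B (the rewrite author's own statement) =====
-- stated objective: alternative
-- what changed: Replaces A's running-maximum accumulator scans with closed-form column widths len(str(n)) and len(str(a*n)), justified by a monotonicity argument (decimal width grows with the value for i=1..n and with |a*i|), plus an explicit n<1 early return.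
import Mathlib
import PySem

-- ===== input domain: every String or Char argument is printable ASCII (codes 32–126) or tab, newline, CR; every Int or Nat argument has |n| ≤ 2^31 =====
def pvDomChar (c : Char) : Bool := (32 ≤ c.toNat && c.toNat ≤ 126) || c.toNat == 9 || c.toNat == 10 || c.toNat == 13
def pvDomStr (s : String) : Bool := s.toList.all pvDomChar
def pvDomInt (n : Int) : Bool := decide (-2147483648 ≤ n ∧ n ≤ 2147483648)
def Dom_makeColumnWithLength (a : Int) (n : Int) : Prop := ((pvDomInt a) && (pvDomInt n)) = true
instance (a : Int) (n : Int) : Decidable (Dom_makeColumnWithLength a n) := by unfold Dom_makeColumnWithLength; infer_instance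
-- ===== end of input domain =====

-- B replaces A's running-maximum scans with closed-form widths len(str(n)) and len(str(a*n)),
-- correct because decimal width is monotone in the value (resp. in |a*i|) (objective: alternative).

-- ===== PORT A =====
def makeColumnWithLength (a : Int) (n : Int) : (List (String × String × String)) × Int × Int × Int :=
  let firstArgLen : Int := PySem.Str.len (PySem.Int.toStr a)
  let st :=
    (PySem.List.pyRange 1 (n + 1) 1).foldl
      (fun (st : List (String × String × String) × Int × Int) i =>
        let cur := (PySem.Int.toStr a, PySem.Int.toStr i, PySem.Int.toStr (a * i))
        (st.1 ++ [cur], max st.2.1 (PySem.Str.len cur.2.1), max st.2.2 (PySem.Str.len cur.2.2)))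
      ([], 0, 0)
  (st.1, firstArgLen, st.2.1, st.2.2)

-- ===== PORT B =====
def makeColumnWithLength_alt (a : Int) (n : Int) : (List (String × String × String)) × Int × Int × Int :=
  let sa := PySem.Int.toStr a
  if n < 1 then ([], PySem.Str.len sa, 0, 0)
  else
    let pre := (PySem.List.pyRange 1 (n + 1) 1).map
        (fun i => (sa, PySem.Int.toStr i, PySem.Int.toStr (a * i)))
    (pre, PySem.Str.len sa, PySem.Str.len (PySem.Int.toStr n), PySem.Str.len (PySem.Int.toStr (a * n)))

-- ===== PRECONDITION & SPEC =====
def Spec_makeColumnWithLength (a : Int) (n : Int) (out : (List (String × String × String)) × Int × Int × Int) : Prop := out = makeColumnWithLength_alt a n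
instance (a : Int) (n : Int) (out : (List (String × String × String)) × Int × Int × Int) : Decidable (Spec_makeColumnWithLength a n out) := by unfold Spec_makeColumnWithLength; infer_instance

-- ===== CLAIM =====
def Claim_equal_makeColumnWithLength : Prop := ∀ (a : Int) (n : Int), Dom_makeColumnWithLength a n → Spec_makeColumnWithLength a n (makeColumnWithLength a n)

-- ===== LEMMAS AND PROOFS =====

-- A's fused loop over any index list equals a map plus two independent max-folds.
theorem pv_fold_split (a : Int) (l : List Int)
    (p : List (String × String × String)) (s t : Int) :
    l.foldl
      (fun (st : List (String × String × String) × Int × Int) i =>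
        let cur := (PySem.Int.toStr a, PySem.Int.toStr i, PySem.Int.toStr (a * i))
        (st.1 ++ [cur], max st.2.1 (PySem.Str.len cur.2.1), max st.2.2 (PySem.Str.len cur.2.2)))
      (p, s, t)
    = (p ++ l.map (fun i => (PySem.Int.toStr a, PySem.Int.toStr i, PySem.Int.toStr (a * i))),
       (l.map (fun i => PySem.Str.len (PySem.Int.toStr i))).foldl max s,
       (l.map (fun i => PySem.Str.len (PySem.Int.toStr (a * i)))).foldl max t) := by
  induction l generalizing p s t with
  | nil => simp
  | cons x xs ih => rw [List.foldl_cons, ih]; simp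

-- Exact length of the decimal digit string produced by Nat.toDigitsCore (enough fuel).
theorem pv_toDigitsCore_len (f n : Nat) (h : n < f) :
    (Nat.toDigitsCore 10 f n []).length = Nat.log 10 n + 1 := by
  induction f generalizing n with
  | zero => omega
  | succ f ih =>
    simp only [Nat.toDigitsCore]
    by_cases h10 : n / 10 = 0
    · have hn : n < 10 := by omega
      simp [h10, Nat.log_of_lt hn]
    · rw [if_neg h10, Nat.toDigitsCore_lens_eq]
      have hn10 : 10 ≤ n := by omega
      rw [ih (n / 10) (by omega), Nat.log_div_base]
      have hpos : 0 < Nat.log 10 n := Nat.log_pos (by norm_num) hn10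
      omega

theorem pv_toDigits_len (n : Nat) : (Nat.toDigits 10 n).length = Nat.log 10 n + 1 := by
  unfold Nat.toDigits
  exact pv_toDigitsCore_len (n + 1) n (Nat.lt_succ_self n)

-- Length of str(x) as an explicit formula.
theorem pv_len_toStr (x : Int) :
    PySem.Str.len (PySem.Int.toStr x)
      = if x < 0 then ((Nat.log 10 x.natAbs : Int) + 2) else ((Nat.log 10 x.toNat : Int) + 1) := by
  simp only [PySem.Str.len, PySem.Int.toStr, PySem.Int.toChars]
  split_ifs with hx
  · simp [pv_toDigits_len]; ring
  · simp [pv_toDigits_len]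

theorem pv_len_nonneg (x : Int) : 0 ≤ PySem.Str.len (PySem.Int.toStr x) := by
  simp [PySem.Str.len]

theorem pv_len_le_nonneg (x y : Int) (hx : 0 ≤ x) (hxy : x ≤ y) :
    PySem.Str.len (PySem.Int.toStr x) ≤ PySem.Str.len (PySem.Int.toStr y) := by
  rw [pv_len_toStr, pv_len_toStr, if_neg (by omega), if_neg (by omega)]
  have : Nat.log 10 x.toNat ≤ Nat.log 10 y.toNat :=
    Nat.log_mono_right (by omega)
  omega

theorem pv_len_le_neg (x y : Int) (hx : x < 0) (hy : y < 0) (hxy : y ≤ x) :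
    PySem.Str.len (PySem.Int.toStr x) ≤ PySem.Str.len (PySem.Int.toStr y) := by
  rw [pv_len_toStr, pv_len_toStr, if_pos hx, if_pos hy]
  have : Nat.log 10 x.natAbs ≤ Nat.log 10 y.natAbs :=
    Nat.log_mono_right (by omega)
  omega

theorem pv_foldl_max_of_le (l : List Int) (s : Int) (h : ∀ x ∈ l, x ≤ s) :
    l.foldl max s = s := by
  induction l generalizing s with
  | nil => rfl
  | cons x xs ih =>
    rw [List.foldl_cons, max_eq_left (h x (by simp))]
    exact ih s (fun y hy => h y (by simp [hy]))

theorem pv_foldl_max_eq (l : List Int) (M s : Int) (hs : s ≤ M)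
    (hall : ∀ x ∈ l, x ≤ M) (hmem : M ∈ l) : l.foldl max s = M := by
  induction l generalizing s with
  | nil => simp at hmem
  | cons x xs ih =>
    rw [List.foldl_cons]
    by_cases hx : M ∈ xs
    · exact ih (max s x) (max_le hs (hall x (by simp)))
        (fun y hy => hall y (by simp [hy])) hx
    · have hxM : x = M := by
        rcases List.mem_cons.mp hmem with h1 | h2
        · exact h1.symm
        · exact absurd h2 hx
      subst hxM
      rw [max_eq_right hs]
      exact pv_foldl_max_of_le xs x (fun y hy => hall y (by simp [hy]))

-- ===== VERDICT =====
theorem makeColumnWithLength_spec : Claim_equal_makeColumnWithLength := by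
  intro a n _
  unfold Spec_makeColumnWithLength makeColumnWithLength makeColumnWithLength_alt
  simp only [pv_fold_split, List.nil_append]
  by_cases hn : n < 1
  · rw [PySem.List.pyRange_one_eq_nil (by omega : (n + 1 : Int) ≤ 1)]
    simp [hn]
  · rw [if_neg hn]
    have hn' : (1:Int) ≤ n := by omega
    have hmemn : n ∈ PySem.List.pyRange 1 (n + 1) 1 :=
      (PySem.List.mem_pyRange_one).mpr ⟨hn', by omega⟩
    refine Prod.ext rfl (Prod.ext rfl (Prod.ext ?_ ?_)) <;> simp only
    · -- second column maximum
      apply pv_foldl_max_eq _ _ _ (pv_len_nonneg n)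
      · intro x hx
        rcases List.mem_map.mp hx with ⟨i, hi, rfl⟩
        rcases (PySem.List.mem_pyRange_one).mp hi with ⟨h1, h2⟩
        exact pv_len_le_nonneg i n (by omega) (by omega)
      · exact List.mem_map.mpr ⟨n, hmemn, rfl⟩
    · -- third column maximum
      apply pv_foldl_max_eq _ _ _ (pv_len_nonneg (a * n))
      · intro x hx
        rcases List.mem_map.mp hx with ⟨i, hi, rfl⟩
        rcases (PySem.List.mem_pyRange_one).mp hi with ⟨h1, h2⟩
        by_cases ha : 0 ≤ a
        · exact pv_len_le_nonneg (a * i) (a * n)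
            (mul_nonneg ha (by omega)) (by nlinarith)
        · have ha' : a < 0 := by omega
          exact pv_len_le_neg (a * i) (a * n)
            (mul_neg_of_neg_of_pos ha' (by omega)) (mul_neg_of_neg_of_pos ha' (by omega))
            (by nlinarith)
      · exact List.mem_map.mpr ⟨n, hmemn, rfl⟩
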